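-- pv_equiv track=rewrite | github.com/evildarkarchon/CLASSIC-8 | Code to Port/ClassicLib/ScanLog/Parser.py | parse_crash_header
-- ===== SOURCE A (Python) =====
-- def parse_crash_header(crash_data: list[str], crashgen_name: str, game_root_name: str) -> tuple[str, str, str]:
--     """
--     Extract metadata from crash data including game version, crash generator version, and main error.
--
--     Args:
--         crash_data: List of strings representing lines of the crash data
--         crashgen_name: Name of the crash generator to be identified
--         game_root_name: Root name of the game to identify game version
--
--     Returns:
--         Tuple containing:
--         - Game version string (or "UNKNOWN")
--         - Crash generator version string (or "UNKNOWN")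
--         - Main error message (or "UNKNOWN")
--     """
--     game_version = "UNKNOWN"
--     crashgen_version = "UNKNOWN"
--     main_error = "UNKNOWN"
--
--     for line in crash_data:
--         if game_root_name and line.startswith(game_root_name):
--             game_version: str = line.strip()
--         if line.startswith(crashgen_name):
--             crashgen_version: str = line.strip()
--         if line.startswith("Unhandled exception"):
--             main_error: str = line.replace("|", "\n", 1)
--
--     return game_version or "UNKNOWN", crashgen_version or "UNKNOWN", main_error or "UNKNOWN"
-- ===== SOURCE B (Python) =====
-- def parse_crash_header(crash_data: list[str], crashgen_name: str, game_root_name: str) -> tuple[str, str, str]: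
--     game_version = next(
--         (line.strip() for line in reversed(crash_data)
--          if game_root_name and line.startswith(game_root_name)),
--         "UNKNOWN",
--     )
--     crashgen_version = next(
--         (line.strip() for line in reversed(crash_data)
--          if line.startswith(crashgen_name)),
--         "UNKNOWN",
--     )
--     main_error = next(
--         (line.replace("|", "\n", 1) for line in reversed(crash_data)
--          if line.startswith("Unhandled exception")),
--         "UNKNOWN",
--     )
--     return game_version or "UNKNOWN", crashgen_version or "UNKNOWN", main_error or "UNKNOWN"
-- ===== Notes on version B (the rewrite author's own statement) =====
-- stated objective: alternative
-- what changed: Replaces the single forward loop mutating three running values with three independent reverse-order first-match searches (next over reversed(crash_data)), one per field.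
import Mathlib
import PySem

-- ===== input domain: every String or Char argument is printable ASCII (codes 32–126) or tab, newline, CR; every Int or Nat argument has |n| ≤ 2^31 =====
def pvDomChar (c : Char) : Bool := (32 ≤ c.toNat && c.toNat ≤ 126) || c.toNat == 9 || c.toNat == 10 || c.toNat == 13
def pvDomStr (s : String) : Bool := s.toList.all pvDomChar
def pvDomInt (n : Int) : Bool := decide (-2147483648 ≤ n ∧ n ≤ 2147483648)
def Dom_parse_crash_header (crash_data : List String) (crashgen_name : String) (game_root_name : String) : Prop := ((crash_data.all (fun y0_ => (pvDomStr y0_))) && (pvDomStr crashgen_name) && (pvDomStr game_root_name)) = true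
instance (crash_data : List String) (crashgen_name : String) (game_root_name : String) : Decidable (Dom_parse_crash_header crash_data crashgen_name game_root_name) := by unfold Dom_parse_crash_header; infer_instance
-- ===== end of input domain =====

-- B replaces A's single forward loop over three running values with three independent
-- reverse-order first-match searches (alternative decomposition, same cost).

-- shared helper: s.replace("|", "\n", 1) — exact hand port (old is the single char '|',
-- maxcount 1 replaces only the first occurrence)
def pvReplacePipeOnce (s : String) : String :=
  match s.toList.findIdx? (fun c => c = '|') with
  | some i => String.ofList (s.toList.take i ++ '\n' :: s.toList.drop (i + 1))
  | none => s

-- Python truthiness fallback: `s or d`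
def pvOrUnknown (s d : String) : String := if s = "" then d else s

-- ===== PORT A =====
def parse_crash_header (crash_data : List String) (crashgen_name : String) (game_root_name : String) : String × String × String :=
  let r := crash_data.foldl
    (fun (st : String × String × String) line =>
      ((if game_root_name ≠ "" && PySem.Str.startswith line game_root_name then PySem.Str.strip line else st.1),
       (if PySem.Str.startswith line crashgen_name then PySem.Str.strip line else st.2.1),
       (if PySem.Str.startswith line "Unhandled exception" then pvReplacePipeOnce line else st.2.2)))
    ("UNKNOWN", "UNKNOWN", "UNKNOWN")
  (pvOrUnknown r.1 "UNKNOWN", pvOrUnknown r.2.1 "UNKNOWN", pvOrUnknown r.2.2 "UNKNOWN")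

-- ===== PORT B =====
-- first match in reversed(crash_data), transformed by f, default "UNKNOWN"
def pvPickRev (xs : List String) (p : String → Bool) (f : String → String) : String :=
  match xs.reverse.find? p with
  | some l => f l
  | none => "UNKNOWN"

def parse_crash_header_alt (crash_data : List String) (crashgen_name : String) (game_root_name : String) : String × String × String :=
  let game_version := pvPickRev crash_data
    (fun line => game_root_name ≠ "" && PySem.Str.startswith line game_root_name) PySem.Str.strip
  let crashgen_version := pvPickRev crash_data
    (fun line => PySem.Str.startswith line crashgen_name) PySem.Str.strip
  let main_error := pvPickRev crash_data
    (fun line => PySem.Str.startswith line "Unhandled exception") pvReplacePipeOnce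
  (pvOrUnknown game_version "UNKNOWN", pvOrUnknown crashgen_version "UNKNOWN", pvOrUnknown main_error "UNKNOWN")

-- ===== PRECONDITION & SPEC =====
def Spec_parse_crash_header (crash_data : List String) (crashgen_name : String) (game_root_name : String) (out : String × String × String) : Prop := out = parse_crash_header_alt crash_data crashgen_name game_root_name
instance (crash_data : List String) (crashgen_name : String) (game_root_name : String) (out : String × String × String) : Decidable (Spec_parse_crash_header crash_data crashgen_name game_root_name out) := by unfold Spec_parse_crash_header; infer_instance

-- ===== CLAIM (what is proved, stated in full; the proofs are below) =====
def Claim_equal_parse_crash_header : Prop := ∀ (crash_data : List String) (crashgen_name : String) (game_root_name : String), Dom_parse_crash_header crash_data crashgen_name game_root_name → Spec_parse_crash_header crash_data crashgen_name game_root_name (parse_crash_header crash_data crashgen_name game_root_name)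

-- ===== LEMMAS AND PROOFS =====

-- a componentwise fold of a triple is the triple of folds
theorem foldl_prod3 (p1 p2 p3 : String → Bool) (g1 g2 g3 : String → String)
    (xs : List String) (a b c : String) :
    xs.foldl (fun (st : String × String × String) l =>
        ((if p1 l then g1 l else st.1), (if p2 l then g2 l else st.2.1), (if p3 l then g3 l else st.2.2)))
      (a, b, c)
      = (xs.foldl (fun acc l => if p1 l then g1 l else acc) a,
         xs.foldl (fun acc l => if p2 l then g2 l else acc) b,
         xs.foldl (fun acc l => if p3 l then g3 l else acc) c) := by
  induction xs generalizing a b c with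
  | nil => rfl
  | cons x xs ih => simp only [List.foldl_cons]; exact ih _ _ _

-- forward last-match fold = first match in the reversed list
theorem foldl_if_eq_find (p : String → Bool) (f : String → String) (init : String) (xs : List String) :
    xs.foldl (fun acc l => if p l then f l else acc) init
      = (match xs.reverse.find? p with | some l => f l | none => init) := by
  induction xs using List.reverseRecOn with
  | nil => rfl
  | append_singleton xs x ih =>
    rw [List.foldl_append, List.reverse_append]
    simp only [List.foldl_cons, List.foldl_nil, List.reverse_singleton, List.singleton_append,
      List.find?]
    cases h : p x with
    | true => simp
    | false => simpa using ih

-- ===== VERDICT (by name: the statement is the Claim_ definition above) =====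
theorem parse_crash_header_spec : Claim_equal_parse_crash_header := by
  intro crash_data crashgen_name game_root_name _
  show parse_crash_header crash_data crashgen_name game_root_name = _
  simp only [parse_crash_header, parse_crash_header_alt, pvPickRev]
  rw [foldl_prod3, foldl_if_eq_find, foldl_if_eq_find, foldl_if_eq_find]
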